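-- pv_equiv track=rewrite | github.com/AleSM33/UTCN | hangman.py | joaca_spanzuratoarea
-- ===== SOURCE A (Python) =====
-- from collections import Counter
--
-- def joaca_spanzuratoarea(cuvant_de_ghicit, max_incercari=600):
--     cuvant_partial = ['*' for _ in cuvant_de_ghicit]
--     incercari = 0
--     litere_ghicite = set()
--
--     litere_frecvente = 'eaoinrstulcmpbdvfghjxzy'
--
--     while '*' in cuvant_partial and incercari < max_incercari:
--         litere_neghicite = [litera for litera in cuvant_de_ghicit if litera not in litere_ghicite]
--
--         if not litere_neghicite:
--             break
--         frecvente_litere = Counter(litera for litera in litere_neghicite)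
--         litera_urmatoare = max(frecvente_litere, key=frecvente_litere.get)
--         for idx, litera in enumerate(cuvant_de_ghicit):
--             if litera == litera_urmatoare:
--                 cuvant_partial[idx] = litera
--
--         litere_ghicite.add(litera_urmatoare)
--         incercari += 1
--
--     return ''.join(cuvant_partial), incercari
-- ===== SOURCE B (Python) =====
-- from collections import Counter
--
-- def joaca_spanzuratoarea(cuvant_de_ghicit, max_incercari=600):
--     # One-pass count; reveal order = distinct letters sorted by frequency desc,
--     # ties kept in first-appearance order (stable sort over Counter's key order).
--     counts = Counter(cuvant_de_ghicit)
--     ordine = sorted(counts, key=counts.get, reverse=True)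
--     k = min(len(ordine), max(0, max_incercari))
--     dezvaluite = set(ordine[:k])
--     rezultat = ''.join(c if c in dezvaluite else '*' for c in cuvant_de_ghicit)
--     return rezultat, k
-- ===== Notes on version B (the rewrite author's own statement) =====
-- stated objective: faster
-- what changed: A repeatedly rescans the word to pick the most frequent unguessed letter (one Counter + max per revealed letter); B counts once, stably sorts the distinct letters by frequency descending (ties keep first-appearance order) and reveals the first min(distinct, max(0, max_incercari)) of them in one shot.
import Mathlib
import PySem

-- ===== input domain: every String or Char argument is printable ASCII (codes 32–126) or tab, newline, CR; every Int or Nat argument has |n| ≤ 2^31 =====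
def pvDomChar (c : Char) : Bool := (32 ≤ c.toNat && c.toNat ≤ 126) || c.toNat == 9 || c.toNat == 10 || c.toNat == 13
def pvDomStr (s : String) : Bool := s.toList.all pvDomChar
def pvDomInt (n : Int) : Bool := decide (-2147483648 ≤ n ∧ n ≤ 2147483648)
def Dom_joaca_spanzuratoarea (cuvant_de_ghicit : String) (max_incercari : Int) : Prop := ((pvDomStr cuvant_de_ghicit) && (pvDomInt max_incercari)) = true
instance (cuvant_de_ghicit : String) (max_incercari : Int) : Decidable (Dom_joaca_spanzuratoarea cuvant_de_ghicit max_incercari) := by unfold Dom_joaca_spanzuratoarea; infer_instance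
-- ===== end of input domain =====

-- B replaces A's per-letter rescan loop (Counter + max once per revealed letter) by a single
-- count followed by one stable sort of the distinct letters by frequency descending; objective: faster.

-- ===== PORT A =====
-- The while loop: each iteration either exits or reveals one more distinct letter, so it runs at
-- most (number of distinct letters) + 1 ≤ w.length + 1 times; fuel only makes this total.
-- Python's max(dict, key=dict.get) = first key attaining the maximal value: PySem.List.max? over
-- the keys with key = getD (exact here: every key is present, so .get never yields None).
def pvLoopA (w : List Char) (max_incercari : Int) (fuel : Nat)
    (cuvant_partial : List Char) (incercari : Int) (litere_ghicite : PySem.Set Char) :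
    List Char × Int :=
  match fuel with
  | 0 => (cuvant_partial, incercari)
  | fuel + 1 =>
    if cuvant_partial.contains '*' && decide (incercari < max_incercari) then
      let litere_neghicite := w.filter (fun litera => !(PySem.Set.contains litere_ghicite litera))
      if litere_neghicite.isEmpty then (cuvant_partial, incercari)
      else
        let frecvente_litere := PySem.Dict.counter litere_neghicite
        match PySem.List.max? frecvente_litere.keys (fun k => frecvente_litere.getD k 0) with
        | none => (cuvant_partial, incercari)  -- unreachable: the counter of a nonempty list has keys
        | some litera_urmatoare =>
          let cuvant_partial' := (PySem.List.enumerate w 0).foldl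
            (fun p il => if il.2 == litera_urmatoare then PySem.List.pySetD p il.1 il.2 else p)
            cuvant_partial
          pvLoopA w max_incercari fuel cuvant_partial' (incercari + 1)
            (PySem.Set.add litere_ghicite litera_urmatoare)
    else (cuvant_partial, incercari)

def joaca_spanzuratoarea (cuvant_de_ghicit : String) (max_incercari : Int) : String × Int :=
  let w := cuvant_de_ghicit.toList
  let _litere_frecvente : String := "eaoinrstulcmpbdvfghjxzy"  -- unused in A, kept for fidelity
  let r := pvLoopA w max_incercari (w.length + 1) (w.map (fun _ => '*')) 0 PySem.Set.empty
  (String.ofList r.1, r.2)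

-- ===== PORT B =====
def joaca_spanzuratoarea_alt (cuvant_de_ghicit : String) (max_incercari : Int) : String × Int :=
  let w := cuvant_de_ghicit.toList
  let counts := PySem.Dict.counter w
  let ordine := PySem.List.sorted counts.keys (fun c => counts.getD c 0) true
  let k : Int := min (ordine.length : Int) (max 0 max_incercari)
  let dezvaluite : PySem.Set Char := PySem.Set.ofList (PySem.List.slice ordine none (some k))
  let rezultat := w.map (fun c => if PySem.Set.contains dezvaluite c then c else '*')
  (String.ofList rezultat, k)

-- ===== PRECONDITION & SPEC =====
def Spec_joaca_spanzuratoarea (cuvant_de_ghicit : String) (max_incercari : Int) (out : String × Int) : Prop := out = joaca_spanzuratoarea_alt cuvant_de_ghicit max_incercari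
instance (cuvant_de_ghicit : String) (max_incercari : Int) (out : String × Int) : Decidable (Spec_joaca_spanzuratoarea cuvant_de_ghicit max_incercari out) := by unfold Spec_joaca_spanzuratoarea; infer_instance

-- ===== CLAIM (what is proved, stated in full; the proofs are below) =====
def Claim_equal_joaca_spanzuratoarea : Prop := ∀ (cuvant_de_ghicit : String) (max_incercari : Int), Dom_joaca_spanzuratoarea cuvant_de_ghicit max_incercari → Spec_joaca_spanzuratoarea cuvant_de_ghicit max_incercari (joaca_spanzuratoarea cuvant_de_ghicit max_incercari)

-- ===== LEMMAS AND PROOFS =====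

-- Abbreviations used only by the proofs.
def pvKey (w : List Char) (c : Char) : Int := (w.count c : Int)
def pvS (w : List Char) : List Char := PySem.List.sorted (PySem.Set.ofList w) (pvKey w) true
def pvK (w : List Char) (m : Int) : Nat := min (PySem.Set.ofList w : List Char).length (max 0 m).toNat
def pvReveal (w G : List Char) : List Char := w.map (fun c => if G.contains c then c else '*')

-- ---- selection of the first maximum = head of the stable descending insertion sort ----
def pvIns (key : Char → Int) (x : Char) (ys : List Char) : List Char :=
  PySem.List.insertBy (fun a b => decide (key b < key a)) x ys
def pvF (key : Char → Int) (acc L : List Char) : List Char :=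
  L.foldl (fun a x => pvIns key x a) acc
def pvRunMax (key : Char → Int) (x : Char) : List Char → Char
  | [] => x
  | t :: T => pvRunMax key (if key x < key t then t else x) T

lemma pvMax?_cons (key : Char → Int) (T : List Char) :
    ∀ x, PySem.List.max? (x :: T) key = some (pvRunMax key x T) := by
  induction T with
  | nil => intro x; rfl
  | cons t T ih =>
    intro x
    have h1 : PySem.List.max? (x :: t :: T) key = PySem.List.max? ((if key x < key t then t else x) :: T) key := by
      simp only [PySem.List.max?, List.foldl]
      split <;> rfl
    rw [h1, ih]
    rfl

lemma pvRunMax_le (key : Char → Int) (T : List Char) (x : Char) :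
    ∀ y ∈ x :: T, key y ≤ key (pvRunMax key x T) :=
  PySem.List.max?_isMax (pvMax?_cons key T x)

lemma pvRunMax_eq_self (key : Char → Int) (T : List Char) :
    ∀ x, (∀ y ∈ T, key y ≤ key x) → pvRunMax key x T = x := by
  induction T with
  | nil => intro x _; rfl
  | cons t T ih =>
    intro x h
    have ht : ¬ key x < key t := not_lt.mpr (h t (by simp))
    simp only [pvRunMax, if_neg ht]
    exact ih x (fun y hy => h y (by simp [hy]))

lemma pvRunMax_irrel (key : Char → Int) (T : List Char) :
    ∀ x x', key x' ≤ key x → key x < key (pvRunMax key x T) →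
      pvRunMax key x' T = pvRunMax key x T := by
  induction T with
  | nil => intro x x' _ h; simp only [pvRunMax] at h; omega
  | cons t T ih =>
    intro x x' hle h
    by_cases hxt : key x < key t
    · have hx't : key x' < key t := lt_of_le_of_lt hle hxt
      simp only [pvRunMax, if_pos hxt, if_pos hx't]
    · simp only [pvRunMax, if_neg hxt] at h ⊢
      by_cases hx't : key x' < key t
      · simp only [if_pos hx't]
        exact ih x t (not_lt.mp hxt) h
      · simp only [if_neg hx't]
        exact ih x x' hle h

lemma pvRunMax_skip (key : Char → Int) (T : List Char) (x : Char)
    (h : key x < key (pvRunMax key x T)) :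
    PySem.List.max? T key = some (pvRunMax key x T) := by
  cases T with
  | nil => simp only [pvRunMax] at h; omega
  | cons t T =>
    rw [pvMax?_cons]
    by_cases hxt : key x < key t
    · simp only [pvRunMax, if_pos hxt]
    · simp only [pvRunMax, if_neg hxt] at h ⊢
      rw [pvRunMax_irrel key T x t (not_lt.mp hxt) h]

lemma pvIns_front (key : Char → Int) (x : Char) (acc : List Char)
    (h : ∀ a ∈ acc, key a < key x) : pvIns key x acc = x :: acc := by
  cases acc with
  | nil => rfl
  | cons a rest =>
    simp only [pvIns, PySem.List.insertBy]
    rw [if_pos (by simpa using h a (by simp))]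

lemma pvF_cons_head (key : Char → Int) (x : Char) (T : List Char)
    (h : ∀ y ∈ T, key y ≤ key x) : ∀ acc, pvF key (x :: acc) T = x :: pvF key acc T := by
  induction T with
  | nil => intro acc; rfl
  | cons t T ih =>
    intro acc
    have h1 : pvIns key t (x :: acc) = x :: pvIns key t acc := by
      simp only [pvIns, PySem.List.insertBy]
      rw [if_neg (by simpa using not_lt.mpr (h t (by simp)))]
    show pvF key (pvIns key t (x :: acc)) T = x :: pvF key (pvIns key t acc) T
    rw [h1]
    exact ih (fun y hy => h y (by simp [hy])) _

lemma pvSelect (key : Char → Int) :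
    ∀ (T : List Char) (acc : List Char) (m : Char), PySem.List.max? T key = some m →
      (∀ a ∈ acc, key a < key m) → pvF key acc T = m :: pvF key acc (T.erase m) := by
  intro T
  induction T with
  | nil => intro acc m hm; simp [PySem.List.max?] at hm
  | cons t T ih =>
    intro acc m hm hacc
    rw [pvMax?_cons] at hm
    have hm' : m = pvRunMax key t T := by exact (Option.some_inj.mp hm).symm
    by_cases hall : ∀ y ∈ T, key y ≤ key t
    · have : m = t := by rw [hm', pvRunMax_eq_self key T t hall]
      subst this
      rw [List.erase_cons_head]
      show pvF key (pvIns key m acc) T = m :: pvF key acc T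
      rw [pvIns_front key m acc hacc]
      exact pvF_cons_head key m T hall acc
    · push Not at hall
      obtain ⟨y, hy, hty⟩ := hall
      have hlt : key t < key m := by
        rw [hm']; exact lt_of_lt_of_le hty (pvRunMax_le key T t y (by simp [hy]))
      have hmax' : PySem.List.max? T key = some m := by
        rw [hm']; exact pvRunMax_skip key T t (hm' ▸ hlt)
      have htm : t ≠ m := fun h => absurd hlt (by rw [h]; omega)
      rw [List.erase_cons_tail (by simpa using htm)]
      show pvF key (pvIns key t acc) T = m :: pvF key (pvIns key t acc) (T.erase m)
      exact ih (pvIns key t acc) m hmax' (by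
        intro a ha
        rcases (PySem.List.mem_insertBy _ _ _ _).mp ha with h | h
        · subst h; exact hlt
        · exact hacc a h)

lemma pvSorted_select (key : Char → Int) (L : List Char) (m : Char)
    (h : PySem.List.max? L key = some m) :
    PySem.List.sorted L key true = m :: PySem.List.sorted (L.erase m) key true := by
  rw [PySem.List.sorted_rev_eq_foldl_insertBy, PySem.List.sorted_rev_eq_foldl_insertBy]
  exact pvSelect key L [] m h (by simp)

-- ---- small structural facts ----

lemma pvAdd_eq (s : PySem.Set Char) (x : Char) :
    PySem.Set.add s x = if (s : List Char).contains x then s else s ++ [x] := rfl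

lemma pvOfList_snoc (xs : List Char) (x : Char) :
    PySem.Set.ofList (xs ++ [x]) = PySem.Set.add (PySem.Set.ofList xs) x := by
  simp [PySem.Set.ofList, List.foldl_append]

lemma pvOfList_filter (p : Char → Bool) (w : List Char) :
    PySem.Set.ofList (w.filter p) = (PySem.Set.ofList w : List Char).filter p := by
  induction w using List.reverseRecOn with
  | nil => rfl
  | append_singleton w x ih =>
    rw [pvOfList_snoc, pvAdd_eq]
    by_cases hp : p x
    · have h1 : List.filter p (w ++ [x]) = List.filter p w ++ [x] := by simp [hp]
      rw [h1, pvOfList_snoc, pvAdd_eq, ih]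
      by_cases hmem : (PySem.Set.ofList w : List Char).contains x
      · rw [if_pos hmem, if_pos (by
          simp only [PySem.Set.contains, List.contains_eq_mem, decide_eq_true_eq, List.mem_filter] at hmem ⊢
          exact ⟨hmem, hp⟩)]
      · rw [if_neg hmem, if_neg (by
          simp only [PySem.Set.contains, List.contains_eq_mem, decide_eq_true_eq, List.mem_filter] at hmem ⊢
          exact fun h => hmem h.1), List.filter_append]
        simp [hp]
    · have h1 : List.filter p (w ++ [x]) = List.filter p w := by simp [hp]
      rw [h1, ih]
      by_cases hmem : (PySem.Set.ofList w : List Char).contains x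
      · rw [if_pos hmem]
      · rw [if_neg hmem, List.filter_append]
        simp [hp]

lemma pvOfList_eq_self (l : List Char) (h : l.Nodup) : PySem.Set.ofList l = l := by
  induction l using List.reverseRecOn with
  | nil => rfl
  | append_singleton l x ih =>
    rw [pvOfList_snoc, pvAdd_eq, ih (List.Nodup.of_append_left h)]
    rw [if_neg (by
      simp only [PySem.Set.contains, List.contains_eq_mem, decide_eq_true_eq]
      exact fun hx => (List.disjoint_of_nodup_append h) hx (by simp))]

lemma pvLength_ofList_le (w : List Char) :
    (PySem.Set.ofList w : List Char).length ≤ w.length := by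
  induction w using List.reverseRecOn with
  | nil => simp [PySem.Set.ofList, PySem.Set.empty]
  | append_singleton w x ih =>
    rw [pvOfList_snoc, pvAdd_eq]
    by_cases hmem : (PySem.Set.ofList w : List Char).contains x
    · rw [if_pos hmem]; simp; omega
    · rw [if_neg hmem]; simp at ih ⊢; omega

def pvStep (k : Char → Int) (a : Option Char) (x : Char) : Option Char :=
  match a with
  | none => some x
  | some m => if k m < k x then some x else some m

lemma pvMaxAux_congr (k1 k2 : Char → Int) :
    ∀ (L : List Char) (acc : Option Char), (∀ x ∈ L, k1 x = k2 x) →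
      (∀ m, acc = some m → k1 m = k2 m) →
      L.foldl (pvStep k1) acc = L.foldl (pvStep k2) acc := by
  intro L
  induction L with
  | nil => intro acc _ _; rfl
  | cons t T ih =>
    intro acc hL hacc
    rw [List.foldl_cons, List.foldl_cons]
    have ht : k1 t = k2 t := hL t (by simp)
    cases acc with
    | none =>
      simp only [pvStep]
      exact ih (some t) (fun x hx => hL x (by simp [hx])) (fun m hm => by cases hm; exact ht)
    | some mm =>
      have hmm : k1 mm = k2 mm := hacc mm rfl
      simp only [pvStep, hmm, ht]
      split
      · exact ih (some t) (fun x hx => hL x (by simp [hx])) (fun m hm => by cases hm; exact ht)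
      · exact ih (some mm) (fun x hx => hL x (by simp [hx])) (fun m hm => by cases hm; exact hmm)

lemma pvMax?_eq_foldl_pvStep (k : Char → Int) (L : List Char) :
    PySem.List.max? L k = L.foldl (pvStep k) none := by
  simp only [PySem.List.max?]
  congr 1
  funext a x
  cases a with
  | none => rfl
  | some m => by_cases h : k m < k x <;> simp [pvStep, h]

lemma pvMax?_congr (k1 k2 : Char → Int) (L : List Char)
    (h : ∀ x ∈ L, k1 x = k2 x) : PySem.List.max? L k1 = PySem.List.max? L k2 := by
  rw [pvMax?_eq_foldl_pvStep, pvMax?_eq_foldl_pvStep]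
  exact pvMaxAux_congr k1 k2 L none h (by simp)

lemma pvSet_append (pre : List Char) (p : List Char) (x : Char) (_hp : p ≠ []) :
    (pre ++ p).set pre.length x = pre ++ (p.set 0 x) := by
  rw [List.set_append_right _ _ (le_refl _)]
  simp

lemma pvUpd (c : Char) :
    ∀ (w p pre : List Char), p.length = w.length →
      (PySem.List.enumerate w (pre.length : Int)).foldl
        (fun acc il => if il.2 == c then PySem.List.pySetD acc il.1 il.2 else acc) (pre ++ p)
      = pre ++ (w.zip p).map (fun xy => if xy.1 = c then c else xy.2) := by
  intro w
  induction w with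
  | nil => intro p pre h; rw [List.length_eq_zero_iff.mp h]; rfl
  | cons x w ih =>
    intro p pre h
    cases p with
    | nil => simp at h
    | cons y p' =>
      rw [PySem.List.enumerate_cons, List.foldl_cons]
      have hset : (if x == c then PySem.List.pySetD (pre ++ y :: p') (pre.length : Int) x
          else pre ++ y :: p') = (pre ++ [if x = c then c else y]) ++ p' := by
        by_cases hx : x = c
        · rw [if_pos (by simpa using hx), PySem.List.pySetD_natCast,
            pvSet_append _ _ _ (by simp)]
          simp [hx]
        · rw [if_neg (by simpa using hx)]
          simp [hx]
      rw [hset]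
      have hlen : ((pre.length : Int) + 1) = (((pre ++ [if x = c then c else y]).length : Nat) : Int) := by
        simp
      rw [hlen, ih p' (pre ++ [if x = c then c else y]) (by simpa using h)]
      simp

lemma pvZipMap (c : Char) (f : Char → Char) (w : List Char) :
    (w.zip (w.map f)).map (fun xy => if xy.1 = c then c else xy.2)
      = w.map (fun x => if x = c then c else f x) := by
  induction w with
  | nil => rfl
  | cons x w ih => simp [ih]


-- ---- the sorted order drives A's selection ----
lemma pvSelectStep (w : List Char) (j : Nat) (hj : j < (pvS w).length)
    (hsor : PySem.List.sorted ((PySem.Set.ofList w : List Char).filter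
        (fun c => !((pvS w).take j).contains c)) (pvKey w) true = (pvS w).drop j) :
    PySem.List.max? ((PySem.Set.ofList w : List Char).filter
        (fun c => !((pvS w).take j).contains c)) (pvKey w) = some ((pvS w)[j]) ∧
    PySem.List.sorted (((PySem.Set.ofList w : List Char).filter
        (fun c => !((pvS w).take j).contains c)).erase ((pvS w)[j])) (pvKey w) true
      = (pvS w).drop (j+1) := by
  set R := (PySem.Set.ofList w : List Char).filter (fun c => !((pvS w).take j).contains c) with hR
  have hdrop : (pvS w).drop j = (pvS w)[j] :: (pvS w).drop (j+1) := List.drop_eq_getElem_cons hj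
  have hne : R ≠ [] := by
    intro h
    rw [h] at hsor
    rw [hdrop] at hsor
    simp [PySem.List.sorted] at hsor
    omega
  obtain ⟨mm, hmm⟩ : ∃ mm, PySem.List.max? R (pvKey w) = some mm := by
    cases h : PySem.List.max? R (pvKey w) with
    | none => exact absurd ((PySem.List.max?_eq_none_iff _ _).mp h) hne
    | some mm => exact ⟨mm, rfl⟩
  have hsel := pvSorted_select (pvKey w) R mm hmm
  rw [hsor, hdrop] at hsel
  obtain ⟨h1, h2⟩ := List.cons.inj hsel
  refine ⟨by rw [hmm, ← h1], ?_⟩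
  rw [h1]
  exact h2.symm

lemma pvInv (w : List Char) :
    ∀ j, j ≤ (pvS w).length →
      PySem.List.sorted ((PySem.Set.ofList w : List Char).filter
          (fun c => !((pvS w).take j).contains c)) (pvKey w) true = (pvS w).drop j := by
  intro j
  induction j with
  | zero =>
    intro _
    simp only [List.take_zero, List.drop_zero]
    have : ((PySem.Set.ofList w : List Char).filter
        (fun c => !(List.contains ([] : List Char) c))) = PySem.Set.ofList w := by
      simp
    rw [this]
    rfl
  | succ j ih =>
    intro hj1
    have hj : j < (pvS w).length := by omega
    have ih' := ih (by omega)
    have hstep := pvSelectStep w j hj ih'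
    have htake : (pvS w).take (j+1) = (pvS w).take j ++ [(pvS w)[j]] :=
      List.take_succ_eq_append_getElem hj
    have hRnodup : ((PySem.Set.ofList w : List Char).filter
        (fun c => !((pvS w).take j).contains c)).Nodup :=
      List.Nodup.filter _ (PySem.Set.nodup_ofList w)
    have hfilter : (PySem.Set.ofList w : List Char).filter
        (fun c => !((pvS w).take (j+1)).contains c)
      = ((PySem.Set.ofList w : List Char).filter
          (fun c => !((pvS w).take j).contains c)).erase ((pvS w)[j]) := by
      rw [List.Nodup.erase_eq_filter hRnodup, List.filter_filter, htake]
      apply List.filter_congr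
      intro c _
      simp only [List.contains_append, Bool.not_or, List.contains_cons, List.contains_nil,
        Bool.or_false]
      rw [Bool.and_comm]
      rfl
    rw [hfilter]
    exact hstep.2

lemma pvMaxR (w : List Char) (j : Nat) (hj : j < (pvS w).length) :
    PySem.List.max? ((PySem.Set.ofList w : List Char).filter
        (fun c => !((pvS w).take j).contains c)) (pvKey w) = some ((pvS w)[j]) :=
  (pvSelectStep w j hj (pvInv w j (by omega))).1

-- ---- facts about S = pvS w ----
lemma pvS_length (w : List Char) : (pvS w).length = (PySem.Set.ofList w : List Char).length :=
  PySem.List.length_sorted _ _ _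

lemma pvS_nodup (w : List Char) : (pvS w).Nodup :=
  (PySem.List.sorted_perm _ _ _).nodup_iff.mpr (PySem.Set.nodup_ofList w)

lemma pvS_mem (w : List Char) (c : Char) : c ∈ pvS w ↔ c ∈ w := by
  unfold pvS
  rw [(PySem.List.sorted_perm _ _ _).mem_iff, PySem.Set.mem_ofList]

lemma pvS_getElem_not_mem_take (w : List Char) (j : Nat) (hj : j < (pvS w).length) :
    (pvS w)[j] ∉ (pvS w).take j := by
  intro hmem
  have hnd : ((pvS w).take j ++ (pvS w).drop j).Nodup := by
    rw [List.take_append_drop]; exact pvS_nodup w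
  exact (List.disjoint_of_nodup_append hnd) hmem
    (by rw [List.drop_eq_getElem_cons hj]; exact List.mem_cons_self)

-- ---- one loop step of A reveals the next letter of the sorted order ----
lemma pvStep_reveal (w : List Char) (j : Nat) (hj : j < (pvS w).length) :
    (PySem.List.enumerate w 0).foldl
        (fun p il => if il.2 == (pvS w)[j] then PySem.List.pySetD p il.1 il.2 else p)
        (pvReveal w ((pvS w).take j))
      = pvReveal w ((pvS w).take (j+1)) := by
  unfold pvReveal
  have h := pvUpd ((pvS w)[j]) w
    (w.map (fun c => if ((pvS w).take j).contains c then c else '*')) [] (by simp)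
  simp only [List.nil_append, List.length_nil, Nat.cast_zero] at h
  rw [h, pvZipMap]
  apply List.map_congr_left
  intro x _
  rw [List.take_succ_eq_append_getElem hj]
  simp only [List.contains_append, List.contains_cons, List.contains_nil, Bool.or_false]
  by_cases hx : x = (pvS w)[j]
  · simp [hx]
  · have : (x == (pvS w)[j]) = false := by simpa using hx
    simp [hx, this]

-- ---- the loop invariant ----
lemma pvLoop_inv (w : List Char) (m : Int) :
    ∀ (fuel j : Nat), j ≤ pvK w m → (PySem.Set.ofList w : List Char).length - j < fuel →
      pvLoopA w m fuel (pvReveal w ((pvS w).take j)) (j : Int) ((pvS w).take j)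
        = (pvReveal w ((pvS w).take (pvK w m)), ((pvK w m : Nat) : Int)) := by
  intro fuel
  induction fuel with
  | zero => intro j _ hfuel; exact absurd hfuel (by omega)
  | succ fuel ih =>
    intro j hjK hfuel
    have hKn : pvK w m ≤ (PySem.Set.ofList w : List Char).length := by unfold pvK; omega
    by_cases hlt : j < pvK w m
    · -- one more letter gets revealed
      have hjn : j < (pvS w).length := by
        rw [pvS_length]; unfold pvK at hlt; omega
      have hjm : (j : Int) < m := by unfold pvK at hlt; omega
      have hSjw : (pvS w)[j] ∈ w := (pvS_mem w _).mp (List.getElem_mem hjn)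
      have hnotin : (pvS w)[j] ∉ (pvS w).take j := pvS_getElem_not_mem_take w j hjn
      have hcontains : ((pvS w).take j).contains ((pvS w)[j]) = false := by
        simp only [List.contains_eq_mem, decide_eq_false_iff_not]
        exact hnotin
      have hstar : '*' ∈ pvReveal w ((pvS w).take j) := by
        unfold pvReveal
        exact List.mem_map.mpr ⟨(pvS w)[j], hSjw, by rw [hcontains]; simp⟩
      have hcond : ((pvReveal w ((pvS w).take j)).contains '*' && decide ((j:Int) < m)) = true := by
        simp [hstar, hjm]
      have hSjneg : (pvS w)[j] ∈ w.filter (fun l => !(PySem.Set.contains ((pvS w).take j) l)) := by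
        rw [List.mem_filter]
        exact ⟨hSjw, by simp [PySem.Set.contains]; exact hnotin⟩
      have hne : (w.filter (fun l => !(PySem.Set.contains ((pvS w).take j) l))).isEmpty = false := by
        simp only [List.isEmpty_eq_false_iff_exists_mem]
        exact ⟨_, hSjneg⟩
      have hkeys : (PySem.Dict.counter (w.filter (fun l => !(PySem.Set.contains ((pvS w).take j) l)))).keys
          = (PySem.Set.ofList w : List Char).filter (fun c => !((pvS w).take j).contains c) := by
        rw [PySem.Dict.keys_counter, pvOfList_filter]
        rfl
      have hmax : PySem.List.max?
          (PySem.Dict.counter (w.filter (fun l => !(PySem.Set.contains ((pvS w).take j) l)))).keys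
          (fun k => (PySem.Dict.counter (w.filter (fun l => !(PySem.Set.contains ((pvS w).take j) l)))).getD k 0)
          = some ((pvS w)[j]) := by
        rw [hkeys]
        have hcongr : ∀ x ∈ (PySem.Set.ofList w : List Char).filter
            (fun c => !((pvS w).take j).contains c),
            (PySem.Dict.counter (w.filter (fun l => !(PySem.Set.contains ((pvS w).take j) l)))).getD x 0
              = pvKey w x := by
          intro x hx
          rw [PySem.Dict.getD_counter]
          have hpx : (!((pvS w).take j).contains x) = true := (List.mem_filter.mp hx).2
          unfold pvKey
          congr 1
          exact List.count_filter (by simpa [PySem.Set.contains] using hpx)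
        rw [pvMax?_congr _ _ _ hcongr]
        exact pvMaxR w j hjn
      have hghicite : PySem.Set.add ((pvS w).take j) ((pvS w)[j]) = (pvS w).take (j+1) := by
        show (if ((pvS w).take j).contains ((pvS w)[j]) then _ else _) = _
        rw [hcontains]
        simp only [Bool.false_eq_true, if_false]
        exact (List.take_succ_eq_append_getElem hjn).symm
      have hinc : (j : Int) + 1 = ((j + 1 : Nat) : Int) := by push_cast; ring
      calc pvLoopA w m (fuel+1) (pvReveal w ((pvS w).take j)) (j : Int) ((pvS w).take j)
          = pvLoopA w m fuel (pvReveal w ((pvS w).take (j+1))) ((j+1 : Nat) : Int)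
              ((pvS w).take (j+1)) := by
            show (if ((pvReveal w ((pvS w).take j)).contains '*' && decide ((j:Int) < m)) = true
              then _ else _) = _
            rw [if_pos hcond]
            simp only [hne, Bool.false_eq_true, if_false, hmax]
            rw [pvStep_reveal w j hjn, hghicite, hinc]
        _ = (pvReveal w ((pvS w).take (pvK w m)), ((pvK w m : Nat) : Int)) :=
            ih (j+1) (by omega) (by omega)
    · -- j = pvK w m: the loop exits, whichever guard fires
      have hjeq : j = pvK w m := by omega
      subst hjeq
      show (if ((pvReveal w ((pvS w).take (pvK w m))).contains '*' && decide (((pvK w m : Nat):Int) < m)) = true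
        then _ else _) = _
      by_cases hc : ((pvReveal w ((pvS w).take (pvK w m))).contains '*' && decide (((pvK w m : Nat):Int) < m)) = true
      · rw [if_pos hc]
        have hKm : ((pvK w m : Nat) : Int) < m := by
          have := (Bool.and_eq_true _ _).mp hc
          simpa using this.2
        have hKeqn : pvK w m = (PySem.Set.ofList w : List Char).length := by
          unfold pvK at hKm ⊢; omega
        have htake : (pvS w).take (pvK w m) = pvS w :=
          List.take_of_length_le (by rw [pvS_length]; omega)
        have hnil : (w.filter (fun l => !(PySem.Set.contains ((pvS w).take (pvK w m)) l))).isEmpty = true := by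
          rw [List.isEmpty_iff, List.filter_eq_nil_iff]
          intro a ha
          rw [htake]
          simp [PySem.Set.contains, List.contains_eq_mem, (pvS_mem w a).mpr ha]
        simp only [hnil, if_true]
      · rw [if_neg hc]

-- ===== VERDICT (by name: the statement is the Claim_ definition above) =====
theorem joaca_spanzuratoarea_spec : Claim_equal_joaca_spanzuratoarea := by
  intro s m _
  show joaca_spanzuratoarea s m = joaca_spanzuratoarea_alt s m
  have h0 : s.toList.map (fun _ => '*') = pvReveal s.toList ((pvS s.toList).take 0) := by
    simp [pvReveal]
  have hA : pvLoopA s.toList m (s.toList.length + 1) (s.toList.map (fun _ => '*')) 0 PySem.Set.empty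
      = (pvReveal s.toList ((pvS s.toList).take (pvK s.toList m)), ((pvK s.toList m : Nat) : Int)) := by
    rw [h0]
    have h00 : (0 : Int) = ((0 : Nat) : Int) := rfl
    have hempty : (PySem.Set.empty : PySem.Set Char) = (pvS s.toList).take 0 := rfl
    rw [h00, hempty]
    exact pvLoop_inv s.toList m (s.toList.length + 1) 0 (by omega)
      (by have := pvLength_ofList_le s.toList; omega)
  have hordine : PySem.List.sorted (PySem.Dict.counter s.toList).keys
      (fun c => (PySem.Dict.counter s.toList).getD c 0) true = pvS s.toList := by
    rw [PySem.Dict.keys_counter]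
    have hkey : (fun c => (PySem.Dict.counter s.toList).getD c 0) = pvKey s.toList :=
      funext fun c => by rw [PySem.Dict.getD_counter]; rfl
    rw [hkey]
    rfl
  have hk : min (((pvS s.toList).length : Nat) : Int) (max 0 m) = ((pvK s.toList m : Nat) : Int) := by
    rw [pvS_length]; unfold pvK; omega
  have hslice : PySem.List.slice (pvS s.toList) none (some (((pvK s.toList m : Nat)) : Int))
      = (pvS s.toList).take (pvK s.toList m) := by
    rw [PySem.List.slice_to (pvS s.toList) (Int.natCast_nonneg _)]
    simp
  have hof : PySem.Set.ofList ((pvS s.toList).take (pvK s.toList m)) = (pvS s.toList).take (pvK s.toList m) :=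
    pvOfList_eq_self _ ((List.take_sublist _ _).nodup (pvS_nodup s.toList))
  simp only [joaca_spanzuratoarea, joaca_spanzuratoarea_alt]
  rw [hA, hordine, hk, hslice, hof]
  rfl
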